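-- pv_equiv track=rewrite | github.com/devv64/cyberAlgos | cyberAlgos.py | SophieGermainNumbers
-- ===== SOURCE A (Python) =====
-- def sieve(n, prime) :
--     p = 2
--     while( p * p <= n ):
--         if (prime[p] == True) :
--             for i in range(p * 2, n, p) :
--                 prime[i] = False
--         p += 1
--
-- def SophieGermainNumbers(n) :
--     nums = 0
--     prime = [True]*(2 * n + 1)
--     sieve(2 * n + 1, prime)
--     for i in range(2, n + 1) :
--         if(len(prime) > (2 * i + 1)):
--             if (prime[i] and prime[2 * i + 1]):
--                 nums = i
--     return nums
-- ===== SOURCE B (Python) =====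
-- def SophieGermainNumbers(n):
--     # Sieve-free re-implementation: scan downward from n-1 and return the first
--     # i with both i and 2*i+1 prime (trial division), i.e. the largest one.
--     def is_prime(x):
--         if x < 2:
--             return False
--         d = 2
--         while d * d <= x:
--             if x % d == 0:
--                 return False
--             d += 1
--         return True
--
--     i = n - 1
--     while i >= 2:
--         if is_prime(i) and is_prime(2 * i + 1):
--             return i
--         i -= 1
--     return 0
-- ===== Notes on version B (the rewrite author's own statement) =====
-- stated objective: faster
-- what changed: Replaced the full Eratosthenes sieve array of size 2n+1 (built and scanned forward for the last hit) with a downward scan from n-1 that returns the first i with i and 2i+1 prime by trial division, exiting early.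
import Mathlib
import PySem

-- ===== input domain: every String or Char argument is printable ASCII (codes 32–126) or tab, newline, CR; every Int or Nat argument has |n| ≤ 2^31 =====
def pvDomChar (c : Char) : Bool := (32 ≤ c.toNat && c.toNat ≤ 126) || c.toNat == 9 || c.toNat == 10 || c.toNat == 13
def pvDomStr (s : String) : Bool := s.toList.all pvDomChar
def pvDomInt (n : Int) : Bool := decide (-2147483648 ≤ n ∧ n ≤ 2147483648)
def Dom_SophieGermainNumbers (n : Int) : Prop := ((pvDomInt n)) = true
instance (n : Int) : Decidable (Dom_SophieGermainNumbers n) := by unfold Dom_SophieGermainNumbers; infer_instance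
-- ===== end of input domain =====

-- B replaces A's full Eratosthenes sieve with a downward trial-division scan from n-1 that
-- returns at the first (= largest) hit; measurably faster; return values proved equal for every int n.

-- ===== PORT A =====

-- termination helper for the two while-loops (cited by name in decreasing_by)
theorem pvWhile_dec {N p : Int} (h : p * p ≤ N) : (N + 1 - (p + 1)).toNat < (N + 1 - p).toNat := by
  have hpN : p ≤ N := by
    rcases le_total p 0 with hp | hp
    · nlinarith
    · nlinarith
  omega

-- 'for i in range(p*2, n, p): prime[i] = False'  (every index is in range: 0 ≤ i < n = len prime,
-- so Array.setIfInBounds is exact for Python's prime[i] = False)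
def pvSieveMark (N p : Int) (prime : Array Bool) : Array Bool :=
  (PySem.List.pyRange (p * 2) N p).foldl (fun pr i => pr.setIfInBounds i.toNat false) prime

-- the 'while p * p <= n' loop of sieve, starting at the current p
-- (prime[p] read with getD: in every reachable state 0 ≤ p < len prime, so it is exact)
def pvSieveLoop (N p : Int) (prime : Array Bool) : Array Bool :=
  if h : p * p ≤ N then
    pvSieveLoop N (p + 1) (if prime.getD p.toNat false = true then pvSieveMark N p prime else prime)
  else prime
termination_by (N + 1 - p).toNat
decreasing_by exact pvWhile_dec h

def pvSieve (N : Int) (prime : Array Bool) : Array Bool := pvSieveLoop N 2 prime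

def SophieGermainNumbers (n : Int) : Int :=
  let prime := Array.replicate (2 * n + 1).toNat true
  let prime := pvSieve (2 * n + 1) prime
  (PySem.List.pyRange 2 (n + 1) 1).foldl
    (fun nums i =>
      if 2 * i + 1 < (prime.size : Int) then
        if prime.getD i.toNat false && prime.getD (2 * i + 1).toNat false then i else nums
      else nums)
    0

-- ===== PORT B =====

-- 'while d * d <= x: if x % d == 0: return False; d += 1'
def pvIsPrimeAux (x d : Int) : Bool :=
  if h : d * d ≤ x then
    if PySem.Int.mod x d = 0 then false else pvIsPrimeAux x (d + 1)
  else true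
termination_by (x + 1 - d).toNat
decreasing_by exact pvWhile_dec h

def pvIsPrime (x : Int) : Bool := if x < 2 then false else pvIsPrimeAux x 2

-- 'while i >= 2: if is_prime(i) and is_prime(2*i+1): return i; i -= 1'
def pvFind (i : Int) : Int :=
  if h : 2 ≤ i then
    if pvIsPrime i && pvIsPrime (2 * i + 1) then i else pvFind (i - 1)
  else 0
termination_by (i - 1).toNat
decreasing_by omega

def SophieGermainNumbers_alt (n : Int) : Int := pvFind (n - 1)

-- ===== PRECONDITION & SPEC =====
def Spec_SophieGermainNumbers (n : Int) (out : Int) : Prop := out = SophieGermainNumbers_alt n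
instance (n : Int) (out : Int) : Decidable (Spec_SophieGermainNumbers n out) := by unfold Spec_SophieGermainNumbers; infer_instance

-- ===== CLAIM (what is proved, stated in full; the proofs are below) =====
def Claim_equal_SophieGermainNumbers : Prop := ∀ (n : Int), Dom_SophieGermainNumbers n → Spec_SophieGermainNumbers n (SophieGermainNumbers n)

-- ===== LEMMAS AND PROOFS =====

-- "no prime q < p divides j with j ≥ 2q": the sieve-loop invariant predicate
def pvGood (p : Int) (j : Nat) : Prop :=
  ¬ ∃ q : Nat, Nat.Prime q ∧ (q : Int) < p ∧ q ∣ j ∧ 2 * q ≤ j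

theorem pvGood_two (j : Nat) : pvGood 2 j := by
  rintro ⟨q, hq, hlt, -, -⟩
  have := hq.two_le
  omega

theorem pvGood_mono {p : Int} {j : Nat} (h : pvGood (p + 1) j) : pvGood p j := by
  rintro ⟨q, hq, hlt, hd, h2⟩
  exact h ⟨q, hq, by omega, hd, h2⟩

-- a composite j ≥ 2 has a prime factor q with q*q ≤ j and 2q ≤ j
theorem pv_minFac_wit {j : Nat} (h2 : 2 ≤ j) (hnp : ¬ Nat.Prime j) :
    ∃ q : Nat, Nat.Prime q ∧ q ∣ j ∧ q * q ≤ j ∧ 2 * q ≤ j := by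
  have hq : Nat.Prime j.minFac := Nat.minFac_prime (by omega)
  have hsq : j.minFac ^ 2 ≤ j := Nat.minFac_sq_le_self (by omega) hnp
  have hsq' : j.minFac * j.minFac ≤ j := by nlinarith
  exact ⟨j.minFac, hq, Nat.minFac_dvd j, hsq', by nlinarith [hq.two_le]⟩

-- pvGood at a p with p*p > N characterises primality below N
theorem pvGood_prime_iff {p N : Int} {j : Nat} (hp2 : 2 ≤ p) (hp : ¬ p * p ≤ N)
    (h2 : 2 ≤ j) (hj : (j : Int) < N) : pvGood p j ↔ Nat.Prime j := by
  constructor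
  · intro hg
    by_contra hnp
    obtain ⟨q, hq, hdvd, hqq, h2q⟩ := pv_minFac_wit h2 hnp
    refine hg ⟨q, hq, ?_, hdvd, h2q⟩
    by_contra hge
    rw [not_lt] at hge
    have hpp : p * p ≤ (q : Int) * q :=
      mul_le_mul hge hge (by omega) (le_trans (by omega) hge)
    have hc : ((q : Int)) * q ≤ (j : Int) := by exact_mod_cast hqq
    omega
  · rintro hpj ⟨q, hq, _, hdvd, h2q⟩
    have hql : q < j := by omega
    rcases (Nat.Prime.eq_one_or_self_of_dvd hpj q hdvd) with h | h
    · exact absurd h hq.one_lt.ne'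
    · omega

-- effect of the marking fold on one entry
theorem pvFoldSet_getD (l : List Int) (hnn : ∀ i ∈ l, 0 ≤ i) (pr : Array Bool) (j : Nat) :
    (l.foldl (fun a i => a.setIfInBounds i.toNat false) pr).getD j false
      = if (j : Int) ∈ l then false else pr.getD j false := by
  induction l generalizing pr with
  | nil => simp
  | cons i t ih =>
    have hi : 0 ≤ i := hnn i (by simp)
    simp only [List.foldl_cons]
    rw [ih (fun x hx => hnn x (by simp [hx]))]
    by_cases ht : (j : Int) ∈ t
    · simp [ht]
    · simp only [ht, if_false, List.mem_cons]
      by_cases hij : (j : Int) = i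
      · subst hij
        simp only [Int.toNat_natCast, or_false]
        by_cases hjl : j < pr.size
        · simp [Array.getD_eq_getD_getElem?, hjl]
        · simp [Array.getD_eq_getD_getElem?, hjl]
      · have hne : i.toNat ≠ j := by omega
        simp [hij, Array.getD_eq_getD_getElem?, Array.getElem?_setIfInBounds_ne hne]

theorem pvFoldSet_size (l : List Int) (pr : Array Bool) :
    (l.foldl (fun a i => a.setIfInBounds i.toNat false) pr).size = pr.size := by
  induction l generalizing pr with
  | nil => rfl
  | cons i t ih => simp [List.foldl_cons, ih]

theorem pvSieveMark_getD {N p : Int} (hp : 0 < p) (pr : Array Bool) (j : Nat) :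
    (pvSieveMark N p pr).getD j false
      = if (p ∣ (j : Int) ∧ 2 * p ≤ (j : Int) ∧ (j : Int) < N) then false
        else pr.getD j false := by
  unfold pvSieveMark
  rw [pvFoldSet_getD _ (fun i hi => by
    rcases (PySem.List.mem_pyRange_iff_of_pos hp i).1 hi with ⟨h1, -, -⟩
    nlinarith)]
  have hiff : ((j : Int) ∈ PySem.List.pyRange (p * 2) N p)
      ↔ (p ∣ (j : Int) ∧ 2 * p ≤ (j : Int) ∧ (j : Int) < N) := by
    rw [PySem.List.mem_pyRange_iff_of_pos hp]
    have hp2 : p ∣ p * 2 := ⟨2, rfl⟩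
    constructor
    · rintro ⟨h1, h2, h3⟩
      refine ⟨?_, by omega, h2⟩
      have := dvd_add h3 hp2
      simpa using this
    · rintro ⟨h1, h2, h3⟩
      exact ⟨by omega, h3, dvd_sub h1 hp2⟩
  exact if_congr hiff rfl rfl

theorem pvSieveLoop_size (N p : Int) (pr : Array Bool) :
    (pvSieveLoop N p pr).size = pr.size := by
  unfold pvSieveLoop
  split
  · rw [pvSieveLoop_size]
    split
    · exact pvFoldSet_size _ _
    · rfl
  · rfl
termination_by (N + 1 - p).toNat
decreasing_by exact pvWhile_dec (by assumption)

-- the sieve-loop invariant, pushed through to the final primality characterisation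
theorem pvSieveLoop_spec (N p : Int) (pr : Array Bool)
    (hp : 2 ≤ p) (hlen : (pr.size : Int) = N)
    (hinv : ∀ j : Nat, j < pr.size → (pr.getD j false = true ↔ pvGood p j)) :
    ∀ j : Nat, 2 ≤ j → (j : Int) < N →
      ((pvSieveLoop N p pr).getD j false = true ↔ Nat.Prime j) := by
  intro j h2 hj
  unfold pvSieveLoop
  split
  · rename_i h
    have hpN : p < N := by nlinarith
    have hPl : p.toNat < pr.size := by omega
    have hPp : ((p.toNat : Nat) : Int) = p := Int.toNat_of_nonneg (by omega)
    by_cases hb : pr.getD p.toNat false = true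
    · -- prime[p] is still true, hence p is prime; its proper multiples get marked
      rw [if_pos hb]
      have hgood : pvGood p p.toNat := (hinv p.toNat hPl).1 hb
      have hprime : Nat.Prime p.toNat := by
        by_contra hnp
        obtain ⟨q, hq, hdvd, hqq, h2q⟩ := pv_minFac_wit (by omega) hnp
        refine hgood ⟨q, hq, ?_, hdvd, h2q⟩
        have := hq.two_le
        omega
      refine pvSieveLoop_spec N (p + 1) _ (by omega) ?_ ?_ j h2 hj
      · rw [pvSieveMark, pvFoldSet_size]; omega
      · intro k hk
        rw [pvSieveMark, pvFoldSet_size] at hk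
        rw [pvSieveMark_getD (by omega)]
        by_cases hcond : (p ∣ (k : Int) ∧ 2 * p ≤ (k : Int) ∧ (k : Int) < N)
        · rw [if_pos hcond]
          obtain ⟨hd, h2p, -⟩ := hcond
          refine iff_of_false (by simp) (fun hg => hg ⟨p.toNat, hprime, by omega, ?_, by omega⟩)
          have : ((p.toNat : Nat) : Int) ∣ ((k : Nat) : Int) := by rw [hPp]; exact hd
          exact_mod_cast this
        · rw [if_neg hcond, hinv k hk]
          constructor
          · rintro hg ⟨q, hq, hlt, hdq, h2q⟩
            by_cases hqp : (q : Int) < p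
            · exact hg ⟨q, hq, hqp, hdq, h2q⟩
            · have hq0 : ((q : Nat) : Int) = p := by omega
              refine hcond ⟨?_, by omega, by omega⟩
              have h' : ((q : Nat) : Int) ∣ ((k : Nat) : Int) := Int.natCast_dvd_natCast.mpr hdq
              rwa [hq0] at h'
          · exact pvGood_mono
    · -- prime[p] already false: p is composite, nothing is marked
      rw [if_neg hb]
      have hbad : ¬ pvGood p p.toNat := fun hg => hb ((hinv p.toNat hPl).2 hg)
      unfold pvGood at hbad
      obtain ⟨q, hq, hlt, hdvd, h2q⟩ := of_not_not hbad
      have hnp : ¬ Nat.Prime p.toNat := by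
        intro hPr
        rcases hPr.eq_one_or_self_of_dvd q hdvd with h1 | h1
        · exact absurd h1 hq.one_lt.ne'
        · omega
      refine pvSieveLoop_spec N (p + 1) _ (by omega) hlen ?_ j h2 hj
      intro k hk
      rw [hinv k hk]
      constructor
      · rintro hg ⟨q', hq', hlt', hdq', h2q'⟩
        by_cases hqp : (q' : Int) < p
        · exact hg ⟨q', hq', hqp, hdq', h2q'⟩
        · have : q' = p.toNat := by omega
          subst this
          exact hnp hq'
      · exact pvGood_mono
  · rename_i h
    exact (hinv j (by omega)).trans (pvGood_prime_iff hp h h2 hj)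
termination_by (N + 1 - p).toNat
decreasing_by all_goals exact pvWhile_dec (by assumption)

theorem pvSieve_spec (n : Int) (j : Nat) (h2 : 2 ≤ j) (hj : (j : Int) < 2 * n + 1) :
    ((pvSieve (2 * n + 1) (Array.replicate (2 * n + 1).toNat true)).getD j false = true
      ↔ Nat.Prime j) := by
  have hn : (0:Int) ≤ 2 * n + 1 := by omega
  refine pvSieveLoop_spec (2 * n + 1) 2 _ le_rfl (by simp [Int.toNat_of_nonneg hn]) ?_ j h2 hj
  intro k hk
  rw [Array.size_replicate] at hk
  rw [Array.getD_eq_getD_getElem?, Array.getElem?_replicate, if_pos hk]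
  exact iff_of_true rfl (pvGood_two k)

-- trial division: pvIsPrimeAux x d = true ↔ no divisor e ≥ d with e*e ≤ x
theorem pvIsPrimeAux_spec (x d : Int) (hd : 2 ≤ d) :
    (pvIsPrimeAux x d = true ↔ ∀ e : Int, d ≤ e → e * e ≤ x → ¬ e ∣ x) := by
  unfold pvIsPrimeAux
  split
  · rename_i h
    by_cases hm : PySem.Int.mod x d = 0
    · have hdvd : d ∣ x := Int.dvd_of_fmod_eq_zero hm
      simp only [hm, if_true]
      constructor
      · intro hc; exact absurd hc (by simp)
      · intro hall; exact absurd hdvd (hall d le_rfl h)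
    · have hndvd : ¬ d ∣ x := fun hc => hm (Int.fmod_eq_zero_of_dvd hc)
      simp only [hm, if_false]
      rw [pvIsPrimeAux_spec x (d + 1) (by omega)]
      constructor
      · intro hall e he hee
        rcases eq_or_lt_of_le he with rfl | hlt
        · exact hndvd
        · exact hall e (by omega) hee
      · intro hall e he hee; exact hall e (by omega) hee
  · rename_i h
    refine iff_of_true rfl (fun e he hee _ => ?_)
    have : d * d ≤ e * e := mul_le_mul he he (by omega) (by omega)
    omega
termination_by (x + 1 - d).toNat
decreasing_by exact pvWhile_dec (by assumption)

theorem pvIsPrime_iff (i : Int) (h2 : 2 ≤ i) : (pvIsPrime i = true ↔ Nat.Prime i.toNat) := by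
  unfold pvIsPrime
  rw [if_neg (by omega), pvIsPrimeAux_spec i 2 le_rfl, Nat.prime_def_le_sqrt]
  constructor
  · intro hall
    refine ⟨by omega, fun m hm hms hdvd => ?_⟩
    have hmm : m * m ≤ i.toNat := Nat.le_sqrt.mp hms
    refine hall (m : Int) (by exact_mod_cast hm) (by omega) ?_
    have : (m : Int) ∣ ((i.toNat : Nat) : Int) := Int.natCast_dvd_natCast.mpr hdvd
    rwa [Int.toNat_of_nonneg (by omega)] at this
  · rintro ⟨-, hall⟩ e he hee hdvd
    have hcast : ((e.toNat * e.toNat : Nat) : Int) ≤ ((i.toNat : Nat) : Int) := by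
      push_cast
      rw [Int.toNat_of_nonneg (by omega : (0:Int) ≤ e), Int.toNat_of_nonneg (by omega : (0:Int) ≤ i)]
      exact hee
    refine hall e.toNat (by omega) (Nat.le_sqrt.mpr (by exact_mod_cast hcast)) ?_
    have : ((e.toNat : Nat) : Int) ∣ ((i.toNat : Nat) : Int) := by
      rw [Int.toNat_of_nonneg (by omega : (0:Int) ≤ e),
        Int.toNat_of_nonneg (by omega : (0:Int) ≤ i)]
      exact hdvd
    exact_mod_cast this

-- the downward early-exit scan equals the forward last-hit fold
theorem pvFind_eq (m : Int) (hm : 1 ≤ m) :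
    (PySem.List.pyRange 2 (m + 1) 1).foldl
      (fun nums i => if pvIsPrime i && pvIsPrime (2 * i + 1) then i else nums) 0 = pvFind m := by
  by_cases h2 : 2 ≤ m
  · rw [PySem.List.pyRange_one_succ_right (by omega : (2:Int) ≤ m),
      List.foldl_append, List.foldl_cons, List.foldl_nil]
    have hih := pvFind_eq (m - 1) (by omega)
    rw [show m - 1 + 1 = m from by ring] at hih
    rw [hih]
    conv_rhs => rw [pvFind]
    rw [dif_pos h2]
  · have hm1 : m = 1 := by omega
    subst hm1
    rw [PySem.List.pyRange_one_eq_nil (by omega)]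
    unfold pvFind
    rw [dif_neg (by omega)]
    rfl
termination_by (m - 1).toNat
decreasing_by omega

-- ===== VERDICT (by name: the statement is the Claim_ definition above) =====
theorem SophieGermainNumbers_spec : Claim_equal_SophieGermainNumbers := by
  unfold Claim_equal_SophieGermainNumbers
  intro n _
  unfold Spec_SophieGermainNumbers
  simp only [SophieGermainNumbers, SophieGermainNumbers_alt]
  by_cases hn : n < 2
  · rw [PySem.List.pyRange_one_eq_nil (by omega : n + 1 ≤ 2), List.foldl_nil]
    unfold pvFind
    rw [dif_neg (by omega)]
  · rw [not_lt] at hn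
    have hf := pvFind_eq (n - 1) (by omega)
    rw [show n - 1 + 1 = n from by ring] at hf
    rw [← hf]
    have hlen : ((pvSieve (2 * n + 1) (Array.replicate (2 * n + 1).toNat true)).size : Int)
        = 2 * n + 1 := by
      rw [pvSieve, pvSieveLoop_size, Array.size_replicate, Int.toNat_of_nonneg (by omega)]
    rw [PySem.List.pyRange_one_succ_right (by omega : (2:Int) ≤ n), List.foldl_append,
      List.foldl_cons, List.foldl_nil, if_neg (by rw [hlen]; omega)]
    refine PySem.List.foldl_congr_mem _ _ _ _ ?_
    intro acc i hi
    obtain ⟨hi2, hin⟩ := (PySem.List.mem_pyRange_one).1 hi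
    rw [if_pos (by rw [hlen]; omega)]
    have e1 : (pvSieve (2 * n + 1) (Array.replicate (2 * n + 1).toNat true)).getD i.toNat false
        = pvIsPrime i := by
      rw [Bool.eq_iff_iff, pvIsPrime_iff i hi2,
        pvSieve_spec n i.toNat (by omega) (by rw [Int.toNat_of_nonneg (by omega)]; omega)]
    have e2 : (pvSieve (2 * n + 1) (Array.replicate (2 * n + 1).toNat true)).getD (2 * i + 1).toNat false
        = pvIsPrime (2 * i + 1) := by
      rw [Bool.eq_iff_iff, pvIsPrime_iff (2 * i + 1) (by omega),
        pvSieve_spec n (2 * i + 1).toNat (by omega) (by rw [Int.toNat_of_nonneg (by omega)]; omega)]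
    rw [e1, e2]
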